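-- pv_equiv track=rewrite | github.com/rudidev08/x4-foundations-version-diff | src/x4_rules_schema_scan.py | choose_repeating_child_entity
-- ===== SOURCE A (Python) =====
-- ID_ATTRIBUTE_CANDIDATES = ("id", "name", "macro")
--
-- def choose_repeating_child_entity(
--     root_tag: str | None,
--     child_counts: dict[str, int],
--     child_attr_presence: dict[str, dict[str, int]],
-- ) -> tuple[str, str] | None:
--     """Pick the best repeating direct child tag plus its id-bearing attribute."""
--     if root_tag == "diff":
--         return None
--
--     candidates: list[tuple[int, str, str]] = []
--     for tag, count in child_counts.items():
--         if count < 2: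
--             continue
--         attr_counts = child_attr_presence.get(tag, {})
--         for attr in ID_ATTRIBUTE_CANDIDATES:
--             if attr_counts.get(attr, 0) == count:
--                 candidates.append((count, tag, attr))
--                 break
--
--     if not candidates:
--         return None
--     candidates.sort(key=lambda item: (-item[0], item[1]))
--     _, tag, attr = candidates[0]
--     return tag, attr
-- ===== SOURCE B (Python) =====
-- ID_ATTRIBUTE_CANDIDATES = ("id", "name", "macro")
--
--
-- def choose_repeating_child_entity(root_tag, child_counts, child_attr_presence):
--     if root_tag == "diff":
--         return None
--     best_key = None
--     best_val = None
--     for tag, count in child_counts.items():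
--         if count < 2:
--             continue
--         attr_counts = child_attr_presence.get(tag, {})
--         attr = next((a for a in ID_ATTRIBUTE_CANDIDATES if attr_counts.get(a, 0) == count), None)
--         if attr is None:
--             continue
--         key = (-count, tag)
--         if best_key is None or key < best_key:
--             best_key = key
--             best_val = (tag, attr)
--     return best_val
-- ===== Notes on version B (the rewrite author's own statement) =====
-- stated objective: simpler
-- what changed: Replaced A's build-a-candidates-list-then-sort-and-take-head with a single pass that keeps one running best (key, tag, attr), so no intermediate list and no sort.
import Mathlib
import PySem

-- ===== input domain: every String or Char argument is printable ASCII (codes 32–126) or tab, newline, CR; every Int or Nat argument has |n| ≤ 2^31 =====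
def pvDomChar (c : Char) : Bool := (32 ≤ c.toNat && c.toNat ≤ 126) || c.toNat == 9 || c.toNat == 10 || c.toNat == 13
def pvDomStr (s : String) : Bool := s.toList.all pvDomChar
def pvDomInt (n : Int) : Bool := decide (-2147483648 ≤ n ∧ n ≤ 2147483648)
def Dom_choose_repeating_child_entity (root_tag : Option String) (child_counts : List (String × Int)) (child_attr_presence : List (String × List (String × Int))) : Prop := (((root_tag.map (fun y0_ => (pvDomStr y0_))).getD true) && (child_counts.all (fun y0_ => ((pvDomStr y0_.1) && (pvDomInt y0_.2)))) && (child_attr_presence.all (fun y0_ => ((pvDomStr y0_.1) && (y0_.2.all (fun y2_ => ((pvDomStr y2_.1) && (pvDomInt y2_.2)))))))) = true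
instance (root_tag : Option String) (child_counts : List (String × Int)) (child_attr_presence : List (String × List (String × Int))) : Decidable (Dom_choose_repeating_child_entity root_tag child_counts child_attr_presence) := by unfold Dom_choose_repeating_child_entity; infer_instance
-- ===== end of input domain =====

-- B replaces A's candidates-list + final sort by a single pass keeping one running best; simpler, same results.

-- ===== PORT A =====
-- the inner 'for attr in ID_ATTRIBUTE_CANDIDATES: if …: …; break' = first matching attribute
def pvFindAttr (attr_counts : List (String × Int)) (count : Int) : Option String :=
  (["id", "name", "macro"]).find? (fun a => PySem.Dict.getD (PySem.Dict.mk attr_counts) a 0 == count)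

def choose_repeating_child_entity (root_tag : Option String) (child_counts : List (String × Int)) (child_attr_presence : List (String × List (String × Int))) : Option (String × String) :=
  if root_tag == some "diff" then none
  else
    let candidates : List (Int × String × String) := child_counts.foldl (fun acc p =>
      if p.2 < (2:Int) then acc
      else
        let attr_counts := PySem.Dict.getD (PySem.Dict.mk child_attr_presence) p.1 []
        match pvFindAttr attr_counts p.2 with
        | some attr => acc ++ [(p.2, p.1, attr)]
        | none => acc) []
    -- 'if not candidates: return None' + sort by (-count, tag) + take the head
    match PySem.List.sorted2 candidates (fun it => -it.1) (fun it => it.2.1) with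
    | [] => none
    | (_, tag, attr) :: _ => some (tag, attr)

-- ===== PORT B =====
def choose_repeating_child_entity_alt (root_tag : Option String) (child_counts : List (String × Int)) (child_attr_presence : List (String × List (String × Int))) : Option (String × String) :=
  if root_tag == some "diff" then none
  else
    let best := child_counts.foldl (fun best p =>
      if p.2 < (2:Int) then best
      else
        let attr_counts := PySem.Dict.getD (PySem.Dict.mk child_attr_presence) p.1 []
        match pvFindAttr attr_counts p.2 with
        | none => best
        | some attr =>
          let key : Int × String := (-p.2, p.1)
          match best with
          | none => some (key, (p.1, attr))
          | some (bk, bv) =>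
            if key.1 < bk.1 ∨ (key.1 = bk.1 ∧ key.2 < bk.2) then some (key, (p.1, attr))
            else some (bk, bv)) (none : Option ((Int × String) × (String × String)))
    best.map (fun b => b.2)

-- ===== PRECONDITION & SPEC =====
def Spec_choose_repeating_child_entity (root_tag : Option String) (child_counts : List (String × Int)) (child_attr_presence : List (String × List (String × Int))) (out : Option (String × String)) : Prop := out = choose_repeating_child_entity_alt root_tag child_counts child_attr_presence
instance (root_tag : Option String) (child_counts : List (String × Int)) (child_attr_presence : List (String × List (String × Int))) (out : Option (String × String)) : Decidable (Spec_choose_repeating_child_entity root_tag child_counts child_attr_presence out) := by unfold Spec_choose_repeating_child_entity; infer_instance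

-- ===== CLAIM (what is proved, stated in full; the proofs are below) =====
def Claim_equal_choose_repeating_child_entity : Prop := ∀ (root_tag : Option String) (child_counts : List (String × Int)) (child_attr_presence : List (String × List (String × Int))), Dom_choose_repeating_child_entity root_tag child_counts child_attr_presence → Spec_choose_repeating_child_entity root_tag child_counts child_attr_presence (choose_repeating_child_entity root_tag child_counts child_attr_presence)

-- ===== LEMMAS AND PROOFS =====

-- the candidate (count, tag, attr) a single child_counts item contributes, if any
def pvCand (cap : List (String × List (String × Int))) (p : String × Int) : Option (Int × String × String) :=
  if p.2 < (2:Int) then none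
  else (pvFindAttr (PySem.Dict.getD (PySem.Dict.mk cap) p.1 []) p.2).map (fun a => (p.2, p.1, a))

lemma candsA_eq (cap : List (String × List (String × Int))) :
    ∀ (l : List (String × Int)) (acc : List (Int × String × String)),
      l.foldl (fun acc p =>
        if p.2 < (2:Int) then acc
        else
          let attr_counts := PySem.Dict.getD (PySem.Dict.mk cap) p.1 []
          match pvFindAttr attr_counts p.2 with
          | some attr => acc ++ [(p.2, p.1, attr)]
          | none => acc) acc = acc ++ l.filterMap (pvCand cap) := by
  intro l
  induction l with
  | nil => intro acc; simp
  | cons p t ih =>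
    intro acc
    simp only [List.foldl_cons, List.filterMap_cons]
    by_cases h : p.2 < (2:Int)
    · rw [if_pos h, ih, show pvCand cap p = none from by simp [pvCand, h]]
    · rw [if_neg h]
      cases hf : pvFindAttr (PySem.Dict.getD (PySem.Dict.mk cap) p.1 []) p.2 with
      | none =>
        rw [ih, show pvCand cap p = none from by simp [pvCand, h, hf]]
      | some a =>
        rw [ih, show pvCand cap p = some (p.2, p.1, a) from by simp [pvCand, h, hf]]
        simp

def pvMinStep {α : Type} (before : α → α → Bool) (m : Option α) (x : α) : Option α :=
  match m with
  | none => some x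
  | some y => if before x y then some x else some y

lemma head_insertBy {α : Type} (before : α → α → Bool) (x : α) (ys : List α) :
    (PySem.List.insertBy before x ys).head? = pvMinStep before ys.head? x := by
  cases ys with
  | nil => rfl
  | cons y t =>
    simp only [PySem.List.insertBy, pvMinStep]
    split <;> simp_all

lemma head_foldl_insertBy {α : Type} (before : α → α → Bool) :
    ∀ (l : List α) (acc : List α),
      (l.foldl (fun acc x => PySem.List.insertBy before x acc) acc).head?
        = l.foldl (pvMinStep before) acc.head? := by
  intro l
  induction l with
  | nil => intro acc; rfl
  | cons x t ih =>
    intro acc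
    simp only [List.foldl_cons, ih, head_insertBy]

-- head of A's stable sort = first minimal element under the (-count, tag) key
lemma head_sorted2_eq_min2 (l : List (Int × String × String)) :
    (PySem.List.sorted2 l (fun it => -it.1) (fun it => it.2.1)).head?
      = PySem.List.min2? l (fun it => -it.1) (fun it => it.2.1) := by
  simp only [PySem.List.sorted2, PySem.List.min2?]
  rw [head_foldl_insertBy]
  rfl

def pvEnc (c : Int × String × String) : (Int × String) × (String × String) :=
  ((-c.1, c.2.1), (c.2.1, c.2.2))

-- B's running-best fold computes min2? of the candidate list, encoded as (key, value)
lemma bfold_eq_min2 (cap : List (String × List (String × Int))) :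
    ∀ (l : List (String × Int)) (m : Option (Int × String × String)),
      l.foldl (fun best p =>
        if p.2 < (2:Int) then best
        else
          let attr_counts := PySem.Dict.getD (PySem.Dict.mk cap) p.1 []
          match pvFindAttr attr_counts p.2 with
          | none => best
          | some attr =>
            let key : Int × String := (-p.2, p.1)
            match best with
            | none => some (key, (p.1, attr))
            | some (bk, bv) =>
              if key.1 < bk.1 ∨ (key.1 = bk.1 ∧ key.2 < bk.2) then some (key, (p.1, attr))
              else some (bk, bv)) (m.map pvEnc)
        = ((l.filterMap (pvCand cap)).foldl
            (pvMinStep (fun a b : Int × String × String =>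
              decide (-a.1 < -b.1) || (!decide (-b.1 < -a.1) && decide (a.2.1 < b.2.1)))) m).map pvEnc := by
  intro l
  induction l with
  | nil => intro m; rfl
  | cons p t ih =>
    intro m
    simp only [List.foldl_cons, List.filterMap_cons]
    by_cases h : p.2 < (2:Int)
    · rw [if_pos h, show pvCand cap p = none from by simp [pvCand, h]]
      exact ih m
    · rw [if_neg h]
      cases hf : pvFindAttr (PySem.Dict.getD (PySem.Dict.mk cap) p.1 []) p.2 with
      | none =>
        rw [show pvCand cap p = none from by simp [pvCand, h, hf]]
        exact ih m
      | some a =>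
        rw [show pvCand cap p = some (p.2, p.1, a) from by simp [pvCand, h, hf]]
        simp only [List.foldl_cons]
        cases m with
        | none => exact ih (some (p.2, p.1, a))
        | some c =>
          simp only [Option.map_some, pvEnc, pvMinStep]
          have hcond : ((-p.2 : Int) < -c.1 ∨ (-p.2 : Int) = -c.1 ∧ p.1 < c.2.1)
              ↔ ((decide ((-p.2 : Int) < -c.1) || (!decide ((-c.1 : Int) < -p.2) && decide (p.1 < c.2.1))) = true) := by
            simp only [Bool.or_eq_true, Bool.and_eq_true, Bool.not_eq_true',
              decide_eq_true_eq, decide_eq_false_iff_not]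
            constructor
            · rintro (h1 | ⟨h1, h2⟩)
              · exact Or.inl h1
              · exact Or.inr ⟨by omega, h2⟩
            · rintro (h1 | ⟨h1, h2⟩)
              · exact Or.inl h1
              · by_cases h3 : (-p.2 : Int) < -c.1
                · exact Or.inl h3
                · exact Or.inr ⟨by omega, h2⟩
          by_cases hc : ((-p.2 : Int) < -c.1 ∨ (-p.2 : Int) = -c.1 ∧ p.1 < c.2.1)
          · rw [if_pos hc, if_pos (hcond.mp hc)]
            exact ih (some (p.2, p.1, a))
          · rw [if_neg hc, if_neg (fun hb => hc (hcond.mpr hb))]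
            exact ih (some c)

-- ===== VERDICT (by name: the statement is the Claim_ definition above) =====
theorem choose_repeating_child_entity_spec : Claim_equal_choose_repeating_child_entity := by
  intro root_tag child_counts child_attr_presence _
  unfold Spec_choose_repeating_child_entity
  unfold choose_repeating_child_entity choose_repeating_child_entity_alt
  by_cases hd : root_tag == some "diff"
  · simp [hd]
  · simp only [hd, Bool.false_eq_true, if_false]
    rw [candsA_eq]
    have hb := bfold_eq_min2 child_attr_presence child_counts none
    simp only [Option.map_none] at hb
    rw [hb]
    simp only [List.nil_append, Option.map_map]
    have hh := head_sorted2_eq_min2 (child_counts.filterMap (pvCand child_attr_presence))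
    rw [show PySem.List.min2? (child_counts.filterMap (pvCand child_attr_presence)) (fun it => -it.1) (fun it => it.2.1)
        = List.foldl (pvMinStep fun a b : Int × String × String => decide (-a.1 < -b.1) || !decide (-b.1 < -a.1) && decide (a.2.1 < b.2.1)) none (child_counts.filterMap (pvCand child_attr_presence)) from rfl] at hh
    rw [← hh]
    cases PySem.List.sorted2 (child_counts.filterMap (pvCand child_attr_presence)) (fun it => -it.1) (fun it => it.2.1) with
    | nil => rfl
    | cons c tl =>
      obtain ⟨f1, t1, a1⟩ := c
      rfl
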